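-- pv_equiv track=rewrite | github.com/hnanth/rg_id | utils.py | max_consecutive_overlap
-- ===== SOURCE A (Python) =====
-- def max_consecutive_overlap(iface, seq, max_errors=2):
--     """
--     seq1: iface
--     seq2: sequence of interest
--     """
--     max_len = 0
--     max_interacting_residues = 0
--
--     for shift in range(-len(seq)+1, len(iface)):
--         current_len = 0
--         current_interacting_residues = 0
--         errors = 0
--         for i in range(len(iface)):
--             j = i - shift
--             if 0 <= j < len(seq):
--                 if iface[i] != "-" and seq[j] != "-":
--                     if iface[i] == seq[j]:
--                         current_len += 1
--                         current_interacting_residues += 1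
--                     elif iface[i].upper() == seq[j] or iface[i] == "?": # add to overlap if one base is ? or one is lower case but same letter
--                         current_len += 1
--                         max_len = max(max_len, current_len)
--                     else:
--                         current_len = 0 # reset streak on mismatch
--                         current_interacting_residues = 0
--                 elif (iface[i] == "-" or seq[j] == "-") and current_len >= 2:
--                     current_len += 1
--                 else:
--                     errors += 1
--                     if errors <= max_errors:
--                         current_len += 1 # allow for mismatch (threshold set by max_errors)
--                     else:
--                         # reset streak if more than
--                         current_len = 0
--                         current_interacting_residues = 0
--
--                 max_len = max(max_len, current_len)
--                 max_interacting_residues = max(max_interacting_residues, current_interacting_residues)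
--             else:
--                 current_len = 0 # reset streak on mismatch or gap
--                 current_interacting_residues = 0
--
--     return max_len, max_interacting_residues
-- ===== SOURCE B (Python) =====
-- def max_consecutive_overlap(iface, seq, max_errors=2):
--     """Single row-major DP pass over the (i, j) alignment table with a rolling
--     1D array of per-diagonal streak states, instead of an explicit scan over
--     every shift."""
--     n, m = len(iface), len(seq)
--     max_len = 0
--     max_interacting_residues = 0
--     prev = [(0, 0, 0)] * m  # prev[j] = (len, res, errors) after cell (i-1, j)
--     for i in range(n):
--         a = iface[i]
--         cur = [(0, 0, 0)] * m
--         for j in range(m):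
--             l, r, e = prev[j - 1] if j > 0 else (0, 0, 0)
--             b = seq[j]
--             if a != "-" and b != "-":
--                 if a == b:
--                     l += 1
--                     r += 1
--                 elif a.upper() == b or a == "?":
--                     l += 1
--                 else:
--                     l = 0
--                     r = 0
--             elif (a == "-" or b == "-") and l >= 2:
--                 l += 1
--             else:
--                 e += 1
--                 if e <= max_errors:
--                     l += 1
--                 else:
--                     l = 0
--                     r = 0
--             cur[j] = (l, r, e)
--             if l > max_len:
--                 max_len = l
--             if r > max_interacting_residues:
--                 max_interacting_residues = r
--         prev = cur
--     return max_len, max_interacting_residues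
-- ===== Notes on version B (the rewrite author's own statement) =====
-- stated objective: alternative
-- what changed: Replaces the explicit scan over every shift (each re-walking all of iface under an in-range guard) by a single row-major DP pass over the (i,j) alignment table with a rolling 1D array of per-diagonal streak states.
import Mathlib
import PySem

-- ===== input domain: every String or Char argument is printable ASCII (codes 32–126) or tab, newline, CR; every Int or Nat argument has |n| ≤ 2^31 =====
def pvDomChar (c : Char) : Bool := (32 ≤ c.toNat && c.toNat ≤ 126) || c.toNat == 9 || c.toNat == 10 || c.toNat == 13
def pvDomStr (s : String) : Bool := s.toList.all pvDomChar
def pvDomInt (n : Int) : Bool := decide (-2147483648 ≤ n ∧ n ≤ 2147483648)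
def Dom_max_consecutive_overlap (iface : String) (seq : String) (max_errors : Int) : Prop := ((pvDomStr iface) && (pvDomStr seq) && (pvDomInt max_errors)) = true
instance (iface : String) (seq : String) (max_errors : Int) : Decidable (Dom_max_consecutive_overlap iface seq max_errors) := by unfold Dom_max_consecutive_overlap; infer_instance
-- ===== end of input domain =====

-- B replaces A's scan over every shift (each re-walking all of iface under an in-range guard)
-- by a single row-major DP pass over the (i,j) table with a rolling 1D array of per-diagonal
-- streak states; same return value, proved equal below.

-- ===== PORT A =====
def max_consecutive_overlap (iface : String) (seq : String) (max_errors : Int) : List Int :=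
  -- transliteration of A: for each shift, scan i over range(len(iface)) with the 0 ≤ j < len(seq) guard
  let A := iface.toList
  let S := seq.toList
  let res := (PySem.List.pyRange (-(S.length : Int) + 1) (A.length : Int) 1).foldl
    (fun (mm : Int × Int) shift =>
      ((PySem.List.pyRange 0 (A.length : Int) 1).foldl
        (fun (st : (Int × Int) × Int × Int × Int) i =>
          let j := i - shift
          if 0 ≤ j ∧ j < (S.length : Int) then
            let a := A.getD i.toNat ' '   -- iface[i]; i ∈ range(len(iface)) so always in range
            let b := S.getD j.toNat ' '   -- seq[j]; guarded by 0 ≤ j < len(seq)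
            let t : Int × (Int × Int × Int) :=
              if a ≠ '-' ∧ b ≠ '-' then
                if a = b then (st.1.1, (st.2.1 + 1, st.2.2.1 + 1, st.2.2.2))
                else if PySem.Chars.upperChar a = b ∨ a = '?' then
                  (max st.1.1 (st.2.1 + 1), (st.2.1 + 1, st.2.2.1, st.2.2.2))
                else (st.1.1, (0, 0, st.2.2.2))
              else if (a = '-' ∨ b = '-') ∧ st.2.1 ≥ 2 then
                (st.1.1, (st.2.1 + 1, st.2.2.1, st.2.2.2))
              else if st.2.2.2 + 1 ≤ max_errors then
                (st.1.1, (st.2.1 + 1, st.2.2.1, st.2.2.2 + 1))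
              else (st.1.1, (0, 0, st.2.2.2 + 1))
            ((max t.1 t.2.1, max st.1.2 t.2.2.1), t.2)
          else ((st.1.1, st.1.2), (0, 0, st.2.2.2)))
        (mm, (0, 0, 0))).1)
    (0, 0)
  [res.1, res.2]

-- ===== PORT B =====
def max_consecutive_overlap_alt (iface : String) (seq : String) (max_errors : Int) : List Int :=
  -- transliteration of B: one row-major pass; prev/cur are the rolling rows of diagonal states
  let n := iface.toList.length
  let m := seq.toList.length
  let fin := (PySem.List.pyRange 0 (n : Int) 1).foldl
    (fun (st : Int × Int × List (Int × Int × Int)) i =>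
      let a := iface.toList.getD i.toNat ' '
      (PySem.List.pyRange 0 (m : Int) 1).foldl
        (fun (rs : Int × Int × List (Int × Int × Int)) j =>
          let p := if j > 0 then st.2.2.getD (j - 1).toNat (0, 0, 0) else ((0 : Int), (0 : Int), (0 : Int))
          let b := seq.toList.getD j.toNat ' '
          let q : Int × Int × Int :=
            if a ≠ '-' ∧ b ≠ '-' then
              if a = b then (p.1 + 1, p.2.1 + 1, p.2.2)
              else if PySem.Chars.upperChar a = b ∨ a = '?' then (p.1 + 1, p.2.1, p.2.2)
              else (0, 0, p.2.2)
            else if (a = '-' ∨ b = '-') ∧ p.1 ≥ 2 then (p.1 + 1, p.2.1, p.2.2)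
            else if p.2.2 + 1 ≤ max_errors then (p.1 + 1, p.2.1, p.2.2 + 1)
            else (0, 0, p.2.2 + 1)
          (if q.1 > rs.1 then q.1 else rs.1,
           if q.2.1 > rs.2.1 then q.2.1 else rs.2.1,
           rs.2.2.set j.toNat q))                      -- cur[j] = q
        (st.1, st.2.1, List.replicate m ((0 : Int), (0 : Int), (0 : Int))))
    (0, 0, List.replicate m ((0 : Int), (0 : Int), (0 : Int)))
  [fin.1, fin.2.1]

-- ===== PRECONDITION & SPEC =====
def Spec_max_consecutive_overlap (iface : String) (seq : String) (max_errors : Int) (out : List Int) : Prop := out = max_consecutive_overlap_alt iface seq max_errors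
instance (iface : String) (seq : String) (max_errors : Int) (out : List Int) : Decidable (Spec_max_consecutive_overlap iface seq max_errors out) := by unfold Spec_max_consecutive_overlap; infer_instance

-- ===== CLAIM (what is proved, stated in full; the proofs are below) =====
def Claim_equal_max_consecutive_overlap : Prop := ∀ (iface : String) (seq : String) (max_errors : Int), Dom_max_consecutive_overlap iface seq max_errors → Spec_max_consecutive_overlap iface seq max_errors (max_consecutive_overlap iface seq max_errors)

-- ===== LEMMAS AND PROOFS =====

-- the common per-cell transition (both Python bodies compute exactly this step)
def pvStep (me : Int) (a b : Char) (p : Int × Int × Int) : Int × Int × Int :=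
  if a ≠ '-' ∧ b ≠ '-' then
    if a = b then (p.1 + 1, p.2.1 + 1, p.2.2)
    else if PySem.Chars.upperChar a = b ∨ a = '?' then (p.1 + 1, p.2.1, p.2.2)
    else (0, 0, p.2.2)
  else if (a = '-' ∨ b = '-') ∧ p.1 ≥ 2 then (p.1 + 1, p.2.1, p.2.2)
  else if p.2.2 + 1 ≤ me then (p.1 + 1, p.2.1, p.2.2 + 1)
  else (0, 0, p.2.2 + 1)

-- the chain state at cell (i, j): fresh start at the border, diagonal predecessor otherwise
def pvSt (me : Int) (A S : List Char) : Nat → Nat → Int × Int × Int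
  | 0, j => pvStep me (A.getD 0 ' ') (S.getD j ' ') (0, 0, 0)
  | i + 1, 0 => pvStep me (A.getD (i + 1) ' ') (S.getD 0 ' ') (0, 0, 0)
  | i + 1, j + 1 => pvStep me (A.getD (i + 1) ' ') (S.getD (j + 1) ' ') (pvSt me A S i j)

lemma pvSt_base (me : Int) (A S : List Char) (i j : Nat) (h : i = 0 ∨ j = 0) :
    pvSt me A S i j = pvStep me (A.getD i ' ') (S.getD j ' ') (0, 0, 0) := by
  rcases h with h | h
  · subst h; cases j <;> rfl
  · subst h; cases i <;> rfl

lemma pvSt_succ (me : Int) (A S : List Char) (i j : Nat) :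
    pvSt me A S (i + 1) (j + 1) = pvStep me (A.getD (i + 1) ' ') (S.getD (j + 1) ' ') (pvSt me A S i j) := rfl

-- accumulate the two maxima from one cell state
def pvJoin (mm : Int × Int) (q : Int × Int × Int) : Int × Int := (max mm.1 q.1, max mm.2 q.2.1)

lemma pvJoin_rcomm (z : Int × Int) (x y : Int × Int × Int) :
    pvJoin (pvJoin z x) y = pvJoin (pvJoin z y) x := by
  simp only [pvJoin, Prod.mk.injEq]; constructor <;> omega

-- the loop bodies of the two ports, as named functions (definitionally the ports' lambdas)
def pvBodyA (me shift : Int) (A S : List Char) (st : (Int × Int) × Int × Int × Int) (i : Int) : (Int × Int) × Int × Int × Int :=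
  let j := i - shift
  if 0 ≤ j ∧ j < (S.length : Int) then
    let a := A.getD i.toNat ' '
    let b := S.getD j.toNat ' '
    let t : Int × (Int × Int × Int) :=
      if a ≠ '-' ∧ b ≠ '-' then
        if a = b then (st.1.1, (st.2.1 + 1, st.2.2.1 + 1, st.2.2.2))
        else if PySem.Chars.upperChar a = b ∨ a = '?' then
          (max st.1.1 (st.2.1 + 1), (st.2.1 + 1, st.2.2.1, st.2.2.2))
        else (st.1.1, (0, 0, st.2.2.2))
      else if (a = '-' ∨ b = '-') ∧ st.2.1 ≥ 2 then
        (st.1.1, (st.2.1 + 1, st.2.2.1, st.2.2.2))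
      else if st.2.2.2 + 1 ≤ me then
        (st.1.1, (st.2.1 + 1, st.2.2.1, st.2.2.2 + 1))
      else (st.1.1, (0, 0, st.2.2.2 + 1))
    ((max t.1 t.2.1, max st.1.2 t.2.2.1), t.2)
  else ((st.1.1, st.1.2), (0, 0, st.2.2.2))

def pvBodyB (me : Int) (a : Char) (S : List Char) (prev : List (Int × Int × Int)) (rs : Int × Int × List (Int × Int × Int)) (j : Int) : Int × Int × List (Int × Int × Int) :=
  let p := if j > 0 then prev.getD (j - 1).toNat (0, 0, 0) else ((0 : Int), (0 : Int), (0 : Int))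
  let b := S.getD j.toNat ' '
  let q : Int × Int × Int :=
    if a ≠ '-' ∧ b ≠ '-' then
      if a = b then (p.1 + 1, p.2.1 + 1, p.2.2)
      else if PySem.Chars.upperChar a = b ∨ a = '?' then (p.1 + 1, p.2.1, p.2.2)
      else (0, 0, p.2.2)
    else if (a = '-' ∨ b = '-') ∧ p.1 ≥ 2 then (p.1 + 1, p.2.1, p.2.2)
    else if p.2.2 + 1 ≤ me then (p.1 + 1, p.2.1, p.2.2 + 1)
    else (0, 0, p.2.2 + 1)
  (if q.1 > rs.1 then q.1 else rs.1,
   if q.2.1 > rs.2.1 then q.2.1 else rs.2.1,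
   rs.2.2.set j.toNat q)

-- the ports, re-expressed through the named bodies (definitional)
lemma portA_eq (iface seq : String) (me : Int) :
    max_consecutive_overlap iface seq me =
      [((PySem.List.pyRange (-(seq.toList.length : Int) + 1) (iface.toList.length : Int) 1).foldl
          (fun mm shift =>
            ((PySem.List.pyRange 0 (iface.toList.length : Int) 1).foldl
              (pvBodyA me shift iface.toList seq.toList) (mm, (0, 0, 0))).1)
          (0, 0)).1,
       ((PySem.List.pyRange (-(seq.toList.length : Int) + 1) (iface.toList.length : Int) 1).foldl
          (fun mm shift =>
            ((PySem.List.pyRange 0 (iface.toList.length : Int) 1).foldl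
              (pvBodyA me shift iface.toList seq.toList) (mm, (0, 0, 0))).1)
          (0, 0)).2] := rfl

lemma portB_eq (iface seq : String) (me : Int) :
    max_consecutive_overlap_alt iface seq me =
      [((PySem.List.pyRange 0 (iface.toList.length : Int) 1).foldl
          (fun st i =>
            (PySem.List.pyRange 0 (seq.toList.length : Int) 1).foldl
              (pvBodyB me (iface.toList.getD i.toNat ' ') seq.toList st.2.2)
              (st.1, st.2.1, List.replicate seq.toList.length ((0 : Int), (0 : Int), (0 : Int))))
          (0, 0, List.replicate seq.toList.length ((0 : Int), (0 : Int), (0 : Int)))).1,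
       ((PySem.List.pyRange 0 (iface.toList.length : Int) 1).foldl
          (fun st i =>
            (PySem.List.pyRange 0 (seq.toList.length : Int) 1).foldl
              (pvBodyB me (iface.toList.getD i.toNat ' ') seq.toList st.2.2)
              (st.1, st.2.1, List.replicate seq.toList.length ((0 : Int), (0 : Int), (0 : Int))))
          (0, 0, List.replicate seq.toList.length ((0 : Int), (0 : Int), (0 : Int)))).2.1] := rfl

-- the A body, on an in-range index, is exactly step + join
lemma pvBodyA_in (me shift : Int) (A S : List Char) (mm : Int × Int) (p : Int × Int × Int) (i : Int)
    (h0 : 0 ≤ i - shift) (h1 : i - shift < (S.length : Int)) :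
    pvBodyA me shift A S (mm, p) i =
      (pvJoin mm (pvStep me (A.getD i.toNat ' ') (S.getD (i - shift).toNat ' ') p),
       pvStep me (A.getD i.toNat ' ') (S.getD (i - shift).toNat ' ') p) := by
  simp only [pvBodyA, pvStep, pvJoin, h0, h1, and_self, if_true]
  split_ifs <;> simp_all [Prod.mk.injEq] <;> constructor <;> omega

lemma pvBodyA_out (me shift : Int) (A S : List Char) (mm : Int × Int) (p : Int × Int × Int) (i : Int)
    (h : ¬(0 ≤ i - shift ∧ i - shift < (S.length : Int))) :
    pvBodyA me shift A S (mm, p) i = (mm, (0, 0, p.2.2)) := by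
  simp only [pvBodyA, h, if_false]

-- out-of-range segment with a clean streak is a fixed point
lemma foldA_out_fix (me shift : Int) (A S : List Char) (mm : Int × Int) (E : Int) :
    ∀ (l : List Int), (∀ i ∈ l, ¬(0 ≤ i - shift ∧ i - shift < (S.length : Int))) →
      List.foldl (pvBodyA me shift A S) (mm, (0, 0, E)) l = (mm, (0, 0, E))
  | [], _ => rfl
  | i :: l, h => by
      rw [List.foldl_cons, pvBodyA_out me shift A S mm _ i (h i (List.mem_cons_self))]
      exact foldA_out_fix me shift A S mm E l (fun x hx => h x (List.mem_cons_of_mem _ hx))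

-- out-of-range segment never changes the maxima
lemma foldA_out_fst (me shift : Int) (A S : List Char) (mm : Int × Int) :
    ∀ (l : List Int) (p : Int × Int × Int), (∀ i ∈ l, ¬(0 ≤ i - shift ∧ i - shift < (S.length : Int))) →
      (List.foldl (pvBodyA me shift A S) (mm, p) l).1 = mm
  | [], _, _ => rfl
  | i :: l, p, h => by
      rw [List.foldl_cons, pvBodyA_out me shift A S mm p i (h i (List.mem_cons_self))]
      exact foldA_out_fst me shift A S mm l _ (fun x hx => h x (List.mem_cons_of_mem _ hx))

-- the in-range segment follows the diagonal chain and joins every cell state into the maxima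
lemma foldA_mid (me s : Int) (A S : List Char) (LO : Int)
    (h0 : 0 ≤ LO) (hs : s ≤ LO) (hbase : LO = 0 ∨ LO = s) :
    ∀ (t : Nat) (mm : Int × Int), LO + t ≤ (A.length : Int) → LO + t ≤ s + (S.length : Int) →
      List.foldl (pvBodyA me s A S) (mm, (0, 0, 0)) (PySem.List.pyRange LO (LO + t) 1) =
        (List.foldl pvJoin mm
          ((PySem.List.pyRange LO (LO + t) 1).map (fun i => pvSt me A S i.toNat (i - s).toNat)),
         if t = 0 then (0, 0, 0) else pvSt me A S (LO + t - 1).toNat (LO + t - 1 - s).toNat) := by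
  intro t
  induction t with
  | zero => intro mm _ _; simp [PySem.List.pyRange_one_eq_nil (by omega : (LO : Int) ≤ LO + (0:Nat))]
  | succ t ih =>
      intro mm hn hm
      have hsplit : PySem.List.pyRange LO (LO + (t + 1 : Nat)) 1 =
          PySem.List.pyRange LO (LO + t) 1 ++ [LO + t] := by
        have : (LO + ((t : Nat) + 1 : Nat) : Int) = (LO + t) + 1 := by push_cast; ring
        rw [this, PySem.List.pyRange_one_succ_right (by omega)]
      rw [hsplit, List.foldl_append, List.map_append, List.foldl_append]
      rw [ih mm (by push_cast at hn ⊢; omega) (by push_cast at hm ⊢; omega)]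
      simp only [List.foldl_cons, List.foldl_nil, List.map_cons, List.map_nil]
      have hin0 : (0 : Int) ≤ (LO + t) - s := by omega
      have hin1 : (LO + t) - s < (S.length : Int) := by push_cast at hm ⊢; omega
      rw [pvBodyA_in me s A S _ _ (LO + t) hin0 hin1]
      have hq : pvStep me (A.getD (LO + t : Int).toNat ' ') (S.getD ((LO + t : Int) - s).toNat ' ')
          (if t = 0 then ((0:Int), (0:Int), (0:Int)) else pvSt me A S (LO + t - 1).toNat (LO + t - 1 - s).toNat)
          = pvSt me A S (LO + t : Int).toNat ((LO + t : Int) - s).toNat := by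
        cases t with
        | zero =>
            have hb := pvSt_base me A S (LO + ((0:Nat):Int)).toNat ((LO + ((0:Nat):Int)) - s).toNat (by omega)
            rw [hb]
            simp
        | succ t' =>
            rw [if_neg (by omega)]
            have e1 : (LO + ((t' + 1 : Nat) : Int)).toNat = (LO + ((t' + 1 : Nat) : Int) - 1).toNat + 1 := by push_cast; omega
            have e2 : ((LO + ((t' + 1 : Nat) : Int)) - s).toNat = (LO + ((t' + 1 : Nat) : Int) - 1 - s).toNat + 1 := by push_cast; omega
            rw [e1, e2, pvSt_succ, ← e1, ← e2]
      rw [hq]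
      refine Prod.ext ?_ ?_
      · rfl
      · rw [if_neg (by omega)]
        congr 2 <;> push_cast <;> ring_nf

-- cell index lists
def pvDiagIdx (n m : Nat) (s : Int) : List (Nat × Nat) :=
  (PySem.List.pyRange (max 0 s) (max (max 0 s) (min (n : Int) (s + (m : Int)))) 1).map
    (fun i => (i.toNat, (i - s).toNat))

def pvDiagAll (n m : Nat) : List (Nat × Nat) :=
  (PySem.List.pyRange (-(m : Int) + 1) (n : Int) 1).flatMap (pvDiagIdx n m)

def pvRowAll (n m : Nat) : List (Nat × Nat) :=
  (List.range n).flatMap (fun i => (List.range m).map (fun j => (i, j)))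

-- per-shift: A's inner scan computes the join over that diagonal's cells
lemma perShift (me : Int) (A S : List Char) (s : Int)
    (h1 : -(S.length : Int) + 1 ≤ s) (h2 : s < (A.length : Int)) (mm : Int × Int) :
    ((PySem.List.pyRange 0 (A.length : Int) 1).foldl (pvBodyA me s A S) (mm, (0, 0, 0))).1 =
      List.foldl pvJoin mm ((pvDiagIdx A.length S.length s).map (fun ij => pvSt me A S ij.1 ij.2)) := by
  set n := (A.length : Int) with hn
  set m := (S.length : Int) with hm
  set LO : Int := max 0 s with hLO
  set HI : Int := max LO (min n (s + m)) with hHI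
  have hb1 : (0 : Int) ≤ LO := by omega
  have hb2 : LO ≤ HI := by omega
  have hb3 : HI ≤ n := by omega
  rw [PySem.List.pyRange_one_append 0 LO n hb1 (by omega),
      PySem.List.pyRange_one_append LO HI n hb2 hb3, List.foldl_append, List.foldl_append]
  rw [foldA_out_fix me s A S mm 0 _ (by
    intro i hi
    rw [PySem.List.mem_pyRange_one] at hi
    omega)]
  have hmid := foldA_mid me s A S LO hb1 (by omega) (by omega) (HI - LO).toNat mm
    (by omega) (by omega)
  have hLOHI : LO + ((HI - LO).toNat : Int) = HI := by omega
  rw [hLOHI] at hmid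
  rw [hmid]
  rw [foldA_out_fst me s A S _ _ _ (by
    intro i hi
    rw [PySem.List.mem_pyRange_one] at hi
    omega)]
  simp only [pvDiagIdx, List.map_map]
  rfl

-- fold of joins over a flatMap = outer fold of inner folds
lemma foldl_join_flatMap (g : Int → List (Int × Int × Int)) :
    ∀ (L : List Int) (mm : Int × Int),
      List.foldl (fun mm s => List.foldl pvJoin mm (g s)) mm L =
        List.foldl pvJoin mm (L.flatMap g)
  | [], _ => rfl
  | s :: L, mm => by
      rw [List.foldl_cons, List.flatMap_cons, List.foldl_append]
      exact foldl_join_flatMap g L _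

-- A computes the join over all diagonal-major cells
lemma portA_val (iface seq : String) (me : Int) :
    max_consecutive_overlap iface seq me =
      [(List.foldl pvJoin (0, 0)
          ((pvDiagAll iface.toList.length seq.toList.length).map
            (fun ij => pvSt me iface.toList seq.toList ij.1 ij.2))).1,
       (List.foldl pvJoin (0, 0)
          ((pvDiagAll iface.toList.length seq.toList.length).map
            (fun ij => pvSt me iface.toList seq.toList ij.1 ij.2))).2] := by
  rw [portA_eq]
  have hcong : ((PySem.List.pyRange (-(seq.toList.length : Int) + 1) (iface.toList.length : Int) 1).foldl
      (fun mm shift =>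
        ((PySem.List.pyRange 0 (iface.toList.length : Int) 1).foldl
          (pvBodyA me shift iface.toList seq.toList) (mm, (0, 0, 0))).1)
      (0, 0)) =
      ((PySem.List.pyRange (-(seq.toList.length : Int) + 1) (iface.toList.length : Int) 1).foldl
      (fun mm s =>
        List.foldl pvJoin mm ((pvDiagIdx iface.toList.length seq.toList.length s).map
          (fun ij => pvSt me iface.toList seq.toList ij.1 ij.2)))
      (0, 0)) := by
    apply PySem.List.foldl_congr_mem
    intro mm s hs
    rw [PySem.List.mem_pyRange_one] at hs
    exact perShift me iface.toList seq.toList s hs.1 hs.2 mm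
  rw [hcong]
  rw [show (fun (mm : Int × Int) s =>
        List.foldl pvJoin mm ((pvDiagIdx iface.toList.length seq.toList.length s).map
          (fun ij => pvSt me iface.toList seq.toList ij.1 ij.2))) =
      (fun (mm : Int × Int) s =>
        List.foldl pvJoin mm ((fun s => (pvDiagIdx iface.toList.length seq.toList.length s).map
          (fun ij => pvSt me iface.toList seq.toList ij.1 ij.2)) s)) from rfl]
  rw [foldl_join_flatMap]
  rw [pvDiagAll, List.map_flatMap]

-- ===== B side =====

lemma pyMaxIf (a b : Int) : (if a > b then a else b) = max b a := by
  split_ifs <;> omega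

-- the B body, at column j < m with the correct diagonal carry, is step + join + write
lemma pvBodyB_eq (me : Int) (a : Char) (S : List Char) (prev : List (Int × Int × Int))
    (rs : Int × Int × List (Int × Int × Int)) (j : Int) :
    pvBodyB me a S prev rs j =
      (if (pvStep me a (S.getD j.toNat ' ')
            (if j > 0 then prev.getD (j - 1).toNat (0, 0, 0) else ((0:Int), (0:Int), (0:Int)))).1 > rs.1
        then (pvStep me a (S.getD j.toNat ' ')
            (if j > 0 then prev.getD (j - 1).toNat (0, 0, 0) else ((0:Int), (0:Int), (0:Int)))).1 else rs.1,
       if (pvStep me a (S.getD j.toNat ' ')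
            (if j > 0 then prev.getD (j - 1).toNat (0, 0, 0) else ((0:Int), (0:Int), (0:Int)))).2.1 > rs.2.1
        then (pvStep me a (S.getD j.toNat ' ')
            (if j > 0 then prev.getD (j - 1).toNat (0, 0, 0) else ((0:Int), (0:Int), (0:Int)))).2.1 else rs.2.1,
       rs.2.2.set j.toNat (pvStep me a (S.getD j.toNat ' ')
            (if j > 0 then prev.getD (j - 1).toNat (0, 0, 0) else ((0:Int), (0:Int), (0:Int))))) := rfl

lemma pvBodyB_step (me : Int) (A S : List Char) (i : Nat) (prev : List (Int × Int × Int))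
    (hread : ∀ j : Nat, j < S.length →
      (if (j : Int) > 0 then prev.getD ((j : Int) - 1).toNat (0, 0, 0) else ((0:Int), (0:Int), (0:Int))) =
        (if i = 0 ∨ j = 0 then ((0:Int), (0:Int), (0:Int)) else pvSt me A S (i - 1) (j - 1)))
    (j : Nat) (hj : j < S.length) (ml mr : Int) (cur : List (Int × Int × Int)) :
    pvBodyB me (A.getD i ' ') S prev (ml, mr, cur) (j : Int) =
      (max ml (pvSt me A S i j).1, max mr (pvSt me A S i j).2.1, cur.set j (pvSt me A S i j)) := by
  have hq : pvStep me (A.getD i ' ') (S.getD j ' ')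
      (if i = 0 ∨ j = 0 then ((0:Int), (0:Int), (0:Int)) else pvSt me A S (i - 1) (j - 1)) =
      pvSt me A S i j := by
    by_cases h : i = 0 ∨ j = 0
    · rw [if_pos h, pvSt_base me A S i j h]
    · rw [if_neg h]
      have hi : i ≠ 0 := fun hh => h (Or.inl hh)
      have hjj : j ≠ 0 := fun hh => h (Or.inr hh)
      obtain ⟨i', rfl⟩ := Nat.exists_eq_succ_of_ne_zero hi
      obtain ⟨j', rfl⟩ := Nat.exists_eq_succ_of_ne_zero hjj
      simp only [Nat.succ_sub_one]
      exact (pvSt_succ me A S i' j').symm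
  have htn : ((j : Int)).toNat = j := by omega
  rw [pvBodyB_eq, htn, hread j hj, hq, pyMaxIf, pyMaxIf]

lemma pv_set_boundary {T : Type} (xs : List T) (ys : List T) (y x : T) :
    (xs ++ y :: ys).set xs.length x = (xs ++ [x]) ++ ys := by
  induction xs with
  | nil => rfl
  | cons a xs ih => simpa using ih

-- one full row of B: prefix-write invariant
lemma rowB (me : Int) (A S : List Char) (i : Nat) (prev : List (Int × Int × Int))
    (hread : ∀ j : Nat, j < S.length →
      (if (j : Int) > 0 then prev.getD ((j : Int) - 1).toNat (0, 0, 0) else ((0:Int), (0:Int), (0:Int))) =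
        (if i = 0 ∨ j = 0 then ((0:Int), (0:Int), (0:Int)) else pvSt me A S (i - 1) (j - 1))) :
    ∀ (t : Nat), t ≤ S.length → ∀ (ml mr : Int),
      List.foldl (pvBodyB me (A.getD i ' ') S prev)
        (ml, mr, List.replicate S.length ((0:Int), (0:Int), (0:Int)))
        (PySem.List.pyRange 0 (t : Int) 1) =
        ((List.foldl pvJoin (ml, mr) ((List.range t).map (pvSt me A S i))).1,
         (List.foldl pvJoin (ml, mr) ((List.range t).map (pvSt me A S i))).2,
         (List.range t).map (pvSt me A S i) ++
           List.replicate (S.length - t) ((0:Int), (0:Int), (0:Int))) := by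
  intro t
  induction t with
  | zero => intro _ ml mr; simp [PySem.List.pyRange_one_eq_nil (by omega : (0:Int) ≤ 0)]
  | succ t ih =>
      intro ht ml mr
      have hsplit : PySem.List.pyRange 0 ((t + 1 : Nat) : Int) 1 =
          PySem.List.pyRange 0 (t : Int) 1 ++ [(t : Int)] := by
        have : (((t : Nat) + 1 : Nat) : Int) = (t : Int) + 1 := by push_cast; ring
        rw [this, PySem.List.pyRange_one_succ_right (by omega)]
      rw [hsplit, List.foldl_append, ih (by omega) ml mr]
      simp only [List.foldl_cons, List.foldl_nil]
      rw [pvBodyB_step me A S i prev hread t (by omega)]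
      have hset : ((List.range t).map (pvSt me A S i) ++
            List.replicate (S.length - t) ((0:Int), (0:Int), (0:Int))).set t (pvSt me A S i t) =
          (List.range (t + 1)).map (pvSt me A S i) ++
            List.replicate (S.length - (t + 1)) ((0:Int), (0:Int), (0:Int)) := by
        obtain ⟨k, hk⟩ : ∃ k, S.length - t = k + 1 := ⟨S.length - (t + 1), by omega⟩
        have hb := pv_set_boundary ((List.range t).map (pvSt me A S i))
          (List.replicate k ((0:Int), (0:Int), (0:Int))) ((0:Int), (0:Int), (0:Int))
          (pvSt me A S i t)
        rw [List.length_map, List.length_range] at hb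
        rw [hk, List.replicate_succ, hb, List.range_succ, List.map_append]
        simp only [List.map_cons, List.map_nil]
        congr 2
        omega
      rw [hset]
      rw [List.range_succ, List.map_append, List.foldl_append]
      simp only [List.map_cons, List.map_nil, List.foldl_cons, List.foldl_nil]
      rfl

-- all rows of B: the rolling array always holds the previous row's chain states
lemma outerB (me : Int) (A S : List Char) :
    ∀ (i : Nat), i ≤ A.length →
      List.foldl
        (fun st k =>
          (PySem.List.pyRange 0 (S.length : Int) 1).foldl
            (pvBodyB me (A.getD k.toNat ' ') S st.2.2)
            (st.1, st.2.1, List.replicate S.length ((0:Int), (0:Int), (0:Int))))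
        ((0 : Int), (0 : Int), List.replicate S.length ((0:Int), (0:Int), (0:Int)))
        (PySem.List.pyRange 0 (i : Int) 1) =
        ((List.foldl pvJoin (0, 0)
            ((List.range i).flatMap (fun i' => (List.range S.length).map (pvSt me A S i')))).1,
         (List.foldl pvJoin (0, 0)
            ((List.range i).flatMap (fun i' => (List.range S.length).map (pvSt me A S i')))).2,
         if i = 0 then List.replicate S.length ((0:Int), (0:Int), (0:Int))
         else (List.range S.length).map (pvSt me A S (i - 1))) := by
  intro i
  induction i with
  | zero => intro _; simp [PySem.List.pyRange_one_eq_nil (by omega : (0:Int) ≤ 0)]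
  | succ i ih =>
      intro hi
      have hsplit : PySem.List.pyRange 0 ((i + 1 : Nat) : Int) 1 =
          PySem.List.pyRange 0 (i : Int) 1 ++ [(i : Int)] := by
        have : (((i : Nat) + 1 : Nat) : Int) = (i : Int) + 1 := by push_cast; ring
        rw [this, PySem.List.pyRange_one_succ_right (by omega)]
      rw [hsplit, List.foldl_append, ih (by omega)]
      simp only [List.foldl_cons, List.foldl_nil]
      have htn : ((i : Int)).toNat = i := by omega
      rw [htn]
      have hread : ∀ j : Nat, j < S.length →
          (if (j : Int) > 0 then
            (if i = 0 then List.replicate S.length ((0:Int), (0:Int), (0:Int))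
             else (List.range S.length).map (pvSt me A S (i - 1))).getD ((j : Int) - 1).toNat (0, 0, 0)
           else ((0:Int), (0:Int), (0:Int))) =
            (if i = 0 ∨ j = 0 then ((0:Int), (0:Int), (0:Int)) else pvSt me A S (i - 1) (j - 1)) := by
        intro j hj
        by_cases hj0 : j = 0
        · subst hj0; simp
        · rw [if_pos (by omega : (j : Int) > 0)]
          have htn2 : ((j : Int) - 1).toNat = j - 1 := by omega
          by_cases hi0 : i = 0
          · subst hi0
            have hrhs : (if (0:Nat) = 0 ∨ j = 0 then ((0:Int),(0:Int),(0:Int)) else pvSt me A S (0-1) (j-1)) = ((0:Int),(0:Int),(0:Int)) := by simp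
            rw [hrhs, if_pos rfl, htn2]
            rcases Nat.lt_or_ge (j - 1) S.length with h | h
            · rw [List.getD_eq_getElem _ _ (by simpa using h)]; simp
            · rw [List.getD_eq_default _ _ (by simpa using h)]
          · rw [if_neg hi0, if_neg (by omega)]
            rw [htn2, List.getD_eq_getElem _ _ (by simp; omega)]
            simp only [List.getElem_map, List.getElem_range]
      rw [rowB me A S i _ hread S.length (le_refl _)]
      simp only [Nat.succ_ne_zero, if_false, Nat.add_sub_cancel]
      rw [List.range_succ, List.flatMap_append]
      simp only [List.flatMap_cons, List.flatMap_nil, List.append_nil, List.foldl_append]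
      rw [Nat.sub_self]
      simp only [List.replicate_zero, List.append_nil]

-- B computes the join over all row-major cells
lemma portB_val (iface seq : String) (me : Int) :
    max_consecutive_overlap_alt iface seq me =
      [(List.foldl pvJoin (0, 0)
          ((pvRowAll iface.toList.length seq.toList.length).map
            (fun ij => pvSt me iface.toList seq.toList ij.1 ij.2))).1,
       (List.foldl pvJoin (0, 0)
          ((pvRowAll iface.toList.length seq.toList.length).map
            (fun ij => pvSt me iface.toList seq.toList ij.1 ij.2))).2] := by
  rw [portB_eq]
  rw [outerB me iface.toList seq.toList iface.toList.length (le_refl _)]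
  have hflat : (pvRowAll iface.toList.length seq.toList.length).map
      (fun ij => pvSt me iface.toList seq.toList ij.1 ij.2) =
      (List.range iface.toList.length).flatMap
        (fun i' => (List.range seq.toList.length).map (pvSt me iface.toList seq.toList i')) := by
    rw [pvRowAll, List.map_flatMap]
    simp [List.map_map, Function.comp_def]
  rw [hflat]

-- ===== the permutation between the two cell enumerations =====

lemma nodup_flatMap_of {α β : Type} (l : List α) (f : α → List β) (hl : l.Nodup)
    (hf : ∀ a ∈ l, (f a).Nodup)
    (hdet : ∀ a ∈ l, ∀ b ∈ l, ∀ x, x ∈ f a → x ∈ f b → a = b) :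
    (l.flatMap f).Nodup := by
  induction l with
  | nil => simp
  | cons a l ih =>
      rw [List.flatMap_cons, List.nodup_append]
      refine ⟨hf a (List.mem_cons_self), ?_, ?_⟩
      · exact ih (List.Nodup.of_cons hl)
          (fun b hb => hf b (List.mem_cons_of_mem _ hb))
          (fun b hb c hc => hdet b (List.mem_cons_of_mem _ hb) c (List.mem_cons_of_mem _ hc))
      · intro x hx y hy
        rw [List.mem_flatMap] at hy
        obtain ⟨b, hb, hyb⟩ := hy
        intro hxy
        subst hxy
        have hab : a = b := hdet a List.mem_cons_self b (List.mem_cons_of_mem _ hb) x hx hyb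
        subst hab
        exact (List.nodup_cons.mp hl).1 hb

lemma mem_pvDiagAll (n m : Nat) (ij : Nat × Nat) :
    ij ∈ pvDiagAll n m ↔ ij.1 < n ∧ ij.2 < m := by
  constructor
  · intro h
    simp only [pvDiagAll, List.mem_flatMap] at h
    obtain ⟨s, hs, hmem⟩ := h
    rw [PySem.List.mem_pyRange_one] at hs
    simp only [pvDiagIdx, List.mem_map] at hmem
    obtain ⟨t, ht, rfl⟩ := hmem
    rw [PySem.List.mem_pyRange_one] at ht
    constructor <;> simp <;> omega
  · intro ⟨h1, h2⟩
    simp only [pvDiagAll, List.mem_flatMap]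
    refine ⟨(ij.1 : Int) - ij.2, ?_, ?_⟩
    · rw [PySem.List.mem_pyRange_one]; omega
    · simp only [pvDiagIdx, List.mem_map]
      refine ⟨(ij.1 : Int), ?_, ?_⟩
      · rw [PySem.List.mem_pyRange_one]; omega
      · have e1 : ((ij.1 : Int)).toNat = ij.1 := by omega
        have e2 : ((ij.1 : Int) - ((ij.1 : Int) - ij.2)).toNat = ij.2 := by omega
        rw [e1, e2]

lemma mem_pvRowAll (n m : Nat) (ij : Nat × Nat) :
    ij ∈ pvRowAll n m ↔ ij.1 < n ∧ ij.2 < m := by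
  simp only [pvRowAll, List.mem_flatMap, List.mem_map, List.mem_range]
  constructor
  · rintro ⟨i, hi, j, hj, rfl⟩; exact ⟨hi, hj⟩
  · rintro ⟨h1, h2⟩; exact ⟨ij.1, h1, ij.2, h2, rfl⟩

lemma nodup_pvDiagAll (n m : Nat) : (pvDiagAll n m).Nodup := by
  apply nodup_flatMap_of _ _ (PySem.List.nodup_pyRange_one _ _)
  · intro s _
    apply List.Nodup.map_on _ (PySem.List.nodup_pyRange_one _ _)
    intro x hx y hy hxy
    rw [PySem.List.mem_pyRange_one] at hx hy
    have : x.toNat = y.toNat := congrArg Prod.fst hxy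
    omega
  · intro a _ b _ x hxa hxb
    simp only [pvDiagIdx, List.mem_map] at hxa hxb
    obtain ⟨t, ht, rfl⟩ := hxa
    obtain ⟨u, hu, he⟩ := hxb
    rw [PySem.List.mem_pyRange_one] at ht hu
    have e1 : u.toNat = t.toNat := congrArg Prod.fst he
    have e2 : (u - b).toNat = (t - a).toNat := congrArg Prod.snd he
    omega

lemma nodup_pvRowAll (n m : Nat) : (pvRowAll n m).Nodup := by
  apply nodup_flatMap_of _ _ (List.nodup_range)
  · intro i _
    exact List.Nodup.map_on (fun x _ y _ h => congrArg Prod.snd h) (List.nodup_range)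
  · intro a _ b _ x hxa hxb
    simp only [List.mem_map, List.mem_range] at hxa hxb
    obtain ⟨j, _, rfl⟩ := hxa
    obtain ⟨k, _, he⟩ := hxb
    exact (congrArg Prod.fst he).symm

lemma perm_diag_row (n m : Nat) : (pvDiagAll n m).Perm (pvRowAll n m) := by
  rw [List.perm_ext_iff_of_nodup (nodup_pvDiagAll n m) (nodup_pvRowAll n m)]
  intro ij
  rw [mem_pvDiagAll, mem_pvRowAll]

-- ===== VERDICT (by name: the statement is the Claim_ definition above) =====
theorem max_consecutive_overlap_spec : Claim_equal_max_consecutive_overlap := by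
  intro iface seq me _
  unfold Spec_max_consecutive_overlap
  rw [portA_val, portB_val]
  have hperm : ((pvDiagAll iface.toList.length seq.toList.length).map
      (fun ij => pvSt me iface.toList seq.toList ij.1 ij.2)).Perm
      ((pvRowAll iface.toList.length seq.toList.length).map
      (fun ij => pvSt me iface.toList seq.toList ij.1 ij.2)) :=
    (perm_diag_row _ _).map _
  rw [hperm.foldl_eq' (fun x _ y _ z => pvJoin_rcomm z x y) (0, 0)]
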